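-- pv_equiv track=rewrite | github.com/kcdbaba/mantri | src/ingestion/image_ocr.py | _extend_from_context
-- ===== SOURCE A (Python) =====
-- def _extend_from_context(fragment: str, context: str) -> list[str]:
--     """
--     Generate extended match candidates using surrounding context.
--
--     e.g., fragment="Chh", context="From: Army Stores Prop Ashish Chh..."
--     → ["Army Stores Prop Ashish Chh", "Prop Ashish Chh", "Ashish Chh"]
--     """
--     ctx_clean = context.rstrip(".…").strip()
--     # Strip common prefixes
--     for prefix in ("from:", "to:", "from", "to"):
--         if ctx_clean.lower().startswith(prefix):
--             ctx_clean = ctx_clean[len(prefix):].strip()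
--
--     words = ctx_clean.split()
--     # Find which word contains our fragment
--     frag_idx = None
--     for i, w in enumerate(words):
--         if w.rstrip(".…").lower().endswith(fragment.lower()) or \
--            w.rstrip(".…").lower() == fragment.lower():
--             frag_idx = i
--             break
--
--     if frag_idx is None:
--         return []
--
--     # Generate progressively longer prefixes
--     extensions = []
--     for start in range(frag_idx, -1, -1):
--         extended = " ".join(words[start:frag_idx + 1]).rstrip(".…").strip()
--         if len(extended) > len(fragment):
--             extensions.append(extended)
--
--     return extensions
-- ===== SOURCE B (Python) =====
-- def _extend_from_context(fragment: str, context: str) -> list[str]: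
--     """Extended match candidates from context, built with an incremental
--     accumulator instead of re-joining a growing slice each pass."""
--     def trim(s: str) -> str:
--         return s.rstrip(".…").strip()
--
--     def strip_prefixes(s: str, prefixes) -> str:
--         if not prefixes:
--             return s
--         head, *rest = prefixes
--         if s.lower().startswith(head):
--             s = s[len(head):].strip()
--         return strip_prefixes(s, rest)
--
--     words = strip_prefixes(trim(context), ["from:", "to:", "from", "to"]).split()
--     frag = fragment.lower()
--     frag_idx = next((i for i, w in enumerate(words)
--                      if w.rstrip(".…").lower().endswith(frag)), None)
--     if frag_idx is None:
--         return []
--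
--     extensions = []
--     acc = ""
--     for w in reversed(words[:frag_idx + 1]):
--         acc = w if not acc else w + " " + acc
--         cand = trim(acc)
--         if len(cand) > len(fragment):
--             extensions.append(cand)
--     return extensions
-- ===== Notes on version B (the rewrite author's own statement) =====
-- stated objective: alternative
-- what changed: B replaces A's slice-and-rejoin candidate loop with a single incremental accumulator grown by prepending one word per step, finds the fragment word with a single endswith test via a first-match search (next/findIdx?) instead of the enumerate-and-break loop with a redundant equality disjunct, and strips the leading from/to prefixes by recursion on the prefix list instead of a for-loop.
import Mathlib
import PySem

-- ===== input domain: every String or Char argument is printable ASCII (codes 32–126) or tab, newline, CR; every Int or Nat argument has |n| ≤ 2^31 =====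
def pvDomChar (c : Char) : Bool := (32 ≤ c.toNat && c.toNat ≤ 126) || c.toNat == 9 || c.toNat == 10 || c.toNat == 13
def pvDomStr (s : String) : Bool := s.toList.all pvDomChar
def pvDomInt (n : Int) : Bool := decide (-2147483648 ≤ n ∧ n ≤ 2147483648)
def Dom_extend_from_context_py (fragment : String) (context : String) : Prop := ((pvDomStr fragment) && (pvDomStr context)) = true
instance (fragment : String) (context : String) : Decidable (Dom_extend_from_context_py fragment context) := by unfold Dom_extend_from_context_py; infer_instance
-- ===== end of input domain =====

-- B replaces A's slice-and-rejoin pass with one incremental accumulator (and a findIdx?/recursive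
-- decomposition of the earlier phases); objective: alternative/simpler inner loop, same exact values.

-- ===== PORT A =====
-- exact port of Python s.rstrip(".…"): drop trailing characters from the set {'.', '…'}
def pvRstripDots (cs : List Char) : List Char :=
  (cs.reverse.dropWhile (fun c => c == '.' || c == '…')).reverse

-- A's 'for i, w in enumerate(words): ... frag_idx = i; break' loop
def pvFindFragA (fragL : List Char) : List (Int × List Char) → Option Int
  | [] => none
  | (i, w) :: rest =>
    if PySem.Chars.endswith (PySem.Chars.lower (pvRstripDots w)) fragL
       || PySem.Chars.lower (pvRstripDots w) == fragL
    then some i else pvFindFragA fragL rest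

def extend_from_context_py (fragment : String) (context : String) : List String :=
  let ctx0 := PySem.Chars.strip (pvRstripDots context.toList)
  let ctx := ["from:".toList, "to:".toList, "from".toList, "to".toList].foldl
    (fun c p => if PySem.Chars.startswith (PySem.Chars.lower c) p
                then PySem.Chars.strip (PySem.List.slice c (some ((p.length : Int))) none)
                else c) ctx0
  let words := PySem.Chars.split₀ ctx
  let fragL := PySem.Chars.lower fragment.toList
  match pvFindFragA fragL (PySem.List.enumerate words 0) with
  | none => []
  | some fi =>
      (PySem.List.pyRange fi (-1) (-1)).foldl
        (fun exts start =>
          let extended := PySem.Chars.strip (pvRstripDots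
            (PySem.Chars.join [' '] (PySem.List.slice words (some start) (some (fi + 1)))))
          if fragment.toList.length < extended.length
          then exts ++ [String.ofList extended] else exts) []

-- ===== PORT B =====
-- B's trim helper: s.rstrip(".…").strip()
def pvTrim (cs : List Char) : List Char := PySem.Chars.strip (pvRstripDots cs)

-- B's recursive strip_prefixes helper
def pvStripPrefixes (s : List Char) : List (List Char) → List Char
  | [] => s
  | p :: rest =>
      pvStripPrefixes
        (if PySem.Chars.startswith (PySem.Chars.lower s) p
         then PySem.Chars.strip (PySem.List.slice s (some ((p.length : Int))) none)
         else s) rest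

-- B's incremental-accumulator loop over reversed(words[:frag_idx+1])
def pvGrow (fragLen : Nat) : List (List Char) → List Char → List String → List String
  | [], _, out => out
  | w :: rest, acc, out =>
      let acc' := if acc.isEmpty then w else w ++ ' ' :: acc
      let cand := pvTrim acc'
      pvGrow fragLen rest acc' (if fragLen < cand.length then out ++ [String.ofList cand] else out)

def extend_from_context_py_alt (fragment : String) (context : String) : List String :=
  let words := PySem.Chars.split₀
    (pvStripPrefixes (pvTrim context.toList)
      ["from:".toList, "to:".toList, "from".toList, "to".toList])
  let fragL := PySem.Chars.lower fragment.toList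
  match words.findIdx?
      (fun w => PySem.Chars.endswith (PySem.Chars.lower (pvRstripDots w)) fragL) with
  | none => []
  | some fi => pvGrow fragment.toList.length ((words.take (fi + 1)).reverse) [] []

-- ===== PRECONDITION & SPEC =====
def Spec_extend_from_context_py (fragment : String) (context : String) (out : List String) : Prop := out = extend_from_context_py_alt fragment context
instance (fragment : String) (context : String) (out : List String) : Decidable (Spec_extend_from_context_py fragment context out) := by unfold Spec_extend_from_context_py; infer_instance

-- ===== CLAIM (what is proved, stated in full; the proofs are below) =====
def Claim_equal_extend_from_context_py : Prop := ∀ (fragment : String) (context : String), Dom_extend_from_context_py fragment context → Spec_extend_from_context_py fragment context (extend_from_context_py fragment context)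

-- ===== LEMMAS AND PROOFS =====

-- B's recursive prefix stripper is A's foldl over the prefixes
theorem pvStripPrefixes_eq_foldl (ps : List (List Char)) (s : List Char) :
    pvStripPrefixes s ps
      = ps.foldl (fun c p => if PySem.Chars.startswith (PySem.Chars.lower c) p
                then PySem.Chars.strip (PySem.List.slice c (some ((p.length : Int))) none)
                else c) s := by
  induction ps generalizing s with
  | nil => rfl
  | cons p rest ih => simp [pvStripPrefixes, List.foldl_cons, ih]

-- A's match condition equals B's (equality implies endswith)
theorem pvCond_eq (w fragL : List Char) :
    (PySem.Chars.endswith (PySem.Chars.lower (pvRstripDots w)) fragL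
       || PySem.Chars.lower (pvRstripDots w) == fragL)
      = PySem.Chars.endswith (PySem.Chars.lower (pvRstripDots w)) fragL := by
  by_cases h : PySem.Chars.lower (pvRstripDots w) = fragL
  · subst h
    have : PySem.Chars.endswith (PySem.Chars.lower (pvRstripDots w)) (PySem.Chars.lower (pvRstripDots w)) = true := by
      rw [PySem.Chars.endswith_iff]
    simp [this]
  · simp [h]

theorem pvFindFragA_eq_findIdx? (fragL : List Char) (ws : List (List Char)) (s : Int) :
    pvFindFragA fragL (PySem.List.enumerate ws s)
      = (ws.findIdx? (fun w => PySem.Chars.endswith (PySem.Chars.lower (pvRstripDots w)) fragL)).map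
          (fun k : Nat => s + (k : Int)) := by
  induction ws generalizing s with
  | nil => simp [PySem.List.enumerate_nil, pvFindFragA]
  | cons w rest ih =>
      rw [PySem.List.enumerate_cons]
      simp only [pvFindFragA, pvCond_eq, List.findIdx?_cons]
      by_cases h : PySem.Chars.endswith (PySem.Chars.lower (pvRstripDots w)) fragL = true
      · simp [h]
      · simp only [h, Bool.false_eq_true, ite_false, ih (s + 1)]
        cases rest.findIdx? (fun w => PySem.Chars.endswith (PySem.Chars.lower (pvRstripDots w)) fragL) with
        | none => simp
        | some k => simp; ring

theorem findIdx?_lt_length {α : Type} (p : α → Bool) (l : List α) (k : Nat)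
    (h : l.findIdx? p = some k) : k < l.length := by
  induction l generalizing k with
  | nil => simp at h
  | cons a t ih =>
      rw [List.findIdx?_cons] at h
      split_ifs at h with hp
      · simp at h; subst h; simp
      · cases ht : t.findIdx? p with
        | none => simp [ht] at h
        | some j =>
            rw [ht] at h; simp at h
            have := ih j ht
            simp only [List.length_cons]; omega

-- every word produced by split₀ is nonempty
theorem split₀_go_ne_nil (s cur : List Char) (acc : List (List Char))
    (hacc : ∀ w ∈ acc, w ≠ []) (w : List Char)
    (hw : w ∈ PySem.Chars.split₀.go s cur acc) : w ≠ [] := by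
  induction s generalizing cur acc with
  | nil =>
      simp only [PySem.Chars.split₀.go] at hw
      split_ifs at hw with hc
      · exact hacc w (by simpa using hw)
      · rw [List.mem_reverse, List.mem_cons] at hw
        rcases hw with h | h
        · subst h; simp [List.isEmpty_iff] at hc; simpa using hc
        · exact hacc w h
  | cons c rest ih =>
      simp only [PySem.Chars.split₀.go] at hw
      split_ifs at hw with h1 h2
      · exact ih [] acc hacc hw
      · refine ih [] (cur.reverse :: acc) ?_ hw
        intro x hx
        rcases List.mem_cons.mp hx with h | h
        · subst h; simp [List.isEmpty_iff] at h2; simpa using h2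
        · exact hacc x h
      · exact ih (c :: cur) acc hacc hw

theorem split₀_ne_nil (s w : List Char) (h : w ∈ PySem.Chars.split₀ s) : w ≠ [] := by
  exact split₀_go_ne_nil s [] [] (by simp) w h

-- the join of a nonempty list of nonempty words is nonempty
theorem join_ne_nil (s : List (List Char)) (hne : s ≠ []) (h : ∀ w ∈ s, w ≠ []) :
    PySem.Chars.join [' '] s ≠ [] := by
  match s with
  | [a] =>
      rw [PySem.Chars.join_singleton]
      exact h a (by simp)
  | a :: b :: t =>
      rw [PySem.Chars.join_cons_cons]
      have : a ≠ [] := h a (by simp)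
      simp [this]

-- join over a growing list: prepending a word
theorem join_cons (w : List Char) (s : List (List Char)) (hs : s ≠ []) :
    PySem.Chars.join [' '] (w :: s) = w ++ ' ' :: PySem.Chars.join [' '] s := by
  match s with
  | b :: t => rw [PySem.Chars.join_cons_cons]; simp

-- the candidate built from a word list
def pvCandOf (ws : List (List Char)) : List Char := pvTrim (PySem.Chars.join [' '] ws)

-- invariant of B's accumulator loop (s = words already absorbed into the accumulator, newest first)
theorem pvGrow_inv (n : Nat) (r : List (List Char)) :
    ∀ (s : List (List Char)) (out : List String), (∀ w ∈ s, w ≠ []) →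
    (∀ w ∈ r, w ≠ []) →
    pvGrow n r (PySem.Chars.join [' '] s) out
      = out ++ ((List.range r.length).filter
            (fun j => n < (pvCandOf ((r.take (j+1)).reverse ++ s)).length)).map
          (fun j => String.ofList (pvCandOf ((r.take (j+1)).reverse ++ s))) := by
  induction r with
  | nil => intro s out _ _; simp [pvGrow]
  | cons w rest ih =>
      intro s out hws hr
      have hwne : w ≠ [] := hr w (by simp)
      have hacc' : (if (PySem.Chars.join [' '] s).isEmpty then w
                    else w ++ ' ' :: PySem.Chars.join [' '] s)
          = PySem.Chars.join [' '] (w :: s) := by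
        cases s with
        | nil => simp [PySem.Chars.join, List.intercalate]
        | cons b t =>
            have hjoin : PySem.Chars.join [' '] (b :: t) ≠ [] :=
              join_ne_nil (b :: t) (by simp) hws
            have : (PySem.Chars.join [' '] (b :: t)).isEmpty = false := by
              simpa [List.isEmpty_iff] using hjoin
            rw [this, join_cons w (b :: t) (by simp)]
            simp
      simp only [pvGrow]
      rw [hacc']
      rw [ih (w :: s) _ (by intro x hx; rcases List.mem_cons.mp hx with h | h
                            · subst h; exact hwne
                            · exact hws x h)
            (fun x hx => hr x (by simp [hx]))]
      rw [List.length_cons, List.range_succ_eq_map, List.filter_cons]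
      have hc : pvTrim (PySem.Chars.join [' '] (w :: s)) = pvCandOf (w :: s) := rfl
      rw [hc]
      split_ifs with h h2 h3
      · simp only [List.map_cons, List.filter_map, List.map_map, Function.comp_def,
          Nat.succ_eq_add_one, List.take_succ_cons, List.take_zero, List.reverse_cons,
          List.reverse_nil, List.nil_append, List.singleton_append, List.append_assoc]
      · exfalso; apply h2; simpa using h
      · exfalso; apply h; simpa using h3
      · simp only [List.filter_map, List.map_map, Function.comp_def, Nat.succ_eq_add_one,
          List.take_succ_cons, List.reverse_cons, List.singleton_append, List.append_assoc]

-- A Prop-valued version of PySem.List.foldl_append_if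
theorem foldl_append_if' {α β : Type} (p : α → Prop) [DecidablePred p] (f : α → β)
    (l : List α) (acc : List β) :
    l.foldl (fun acc x => if p x then acc ++ [f x] else acc) acc
      = acc ++ (l.filter (fun x => decide (p x))).map f := by
  induction l generalizing acc with
  | nil => simp
  | cons a t ih =>
      simp only [List.foldl_cons, List.filter_cons, ih]
      by_cases h : p a
      · simp [h]
      · simp [h]

theorem filtermap_congr {α β : Type} (p q : α → Bool) (f g : α → β) (l : List α)
    (hp : ∀ x ∈ l, p x = q x) (hf : ∀ x ∈ l, f x = g x) :
    (l.filter p).map f = (l.filter q).map g := by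
  rw [List.filter_congr hp]
  exact List.map_congr_left (fun x hx => hf x (List.mem_of_mem_filter hx))

-- ===== VERDICT (by name: the statement is the Claim_ definition above) =====
theorem extend_from_context_py_spec : Claim_equal_extend_from_context_py := by
  intro fragment context _
  unfold Spec_extend_from_context_py extend_from_context_py extend_from_context_py_alt
  simp only [pvTrim, pvStripPrefixes_eq_foldl]
  rw [pvFindFragA_eq_findIdx?]
  cases hidx : (PySem.Chars.split₀
      (List.foldl (fun c p => if PySem.Chars.startswith (PySem.Chars.lower c) p = true
          then PySem.Chars.strip (PySem.List.slice c (some ((p.length : Int))) none) else c)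
        (PySem.Chars.strip (pvRstripDots context.toList))
        ["from:".toList, "to:".toList, "from".toList, "to".toList])).findIdx?
      (fun w => PySem.Chars.endswith (PySem.Chars.lower (pvRstripDots w))
        (PySem.Chars.lower fragment.toList)) with
  | none => simp
  | some k =>
      simp only [Option.map_some, zero_add]
      generalize hws : PySem.Chars.split₀ _ = words at hidx
      have hk : k < words.length := findIdx?_lt_length _ _ _ hidx
      have hwne : ∀ w ∈ words, w ≠ [] := by
        intro w hw; rw [← hws] at hw; exact split₀_ne_nil _ w hw
      -- A's side: countdown range → filter/map over List.range (k+1)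
      rw [PySem.List.pyRange_neg_one]
      have htn : ((k : Int) - (-1)).toNat = k + 1 := by omega
      rw [htn, List.foldl_map]
      rw [foldl_append_if'
            (fun j : Nat => fragment.toList.length <
              (PySem.Chars.strip (pvRstripDots (PySem.Chars.join [' ']
                (PySem.List.slice words (some ((k : Int) - j)) (some ((k : Int) + 1)))))).length)
            (fun j : Nat => String.ofList
              (PySem.Chars.strip (pvRstripDots (PySem.Chars.join [' ']
                (PySem.List.slice words (some ((k : Int) - j)) (some ((k : Int) + 1)))))))]
      -- B's side: the accumulator loop → the same filter/map
      conv_rhs => rw [show ([] : List Char) = PySem.Chars.join [' '] [] from rfl]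
      rw [pvGrow_inv fragment.toList.length ((words.take (k+1)).reverse) [] [] (by simp)
            (by intro w hw
                rw [List.mem_reverse] at hw
                exact hwne w (List.mem_of_mem_take hw))]
      -- both are filter/map over List.range (k+1) of the same candidate
      have hlen : ((words.take (k+1)).reverse).length = k + 1 := by
        simp [List.length_take]; omega
      rw [hlen]
      have hslice : ∀ j : Nat, j < k + 1 →
          PySem.List.slice words (some ((k : Int) - j)) (some ((k : Int) + 1))
            = (((words.take (k+1)).reverse.take (j+1)).reverse ++ ([] : List (List Char))) := by
        intro j hj
        rw [List.append_nil]
        have e1 : ((k : Int) - j) = ((k - j : Nat) : Int) := by omega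
        have e2 : ((k : Int) + 1) = ((k + 1 : Nat) : Int) := by omega
        rw [e1, e2, PySem.List.slice_natCast]
        rw [List.take_reverse, List.reverse_reverse]
        have e3 : (words.take (k+1)).length = k + 1 := by simp; omega
        rw [e3, List.drop_take]
        have e4 : k + 1 - (j + 1) = k - j := by omega
        rw [e4]
      have hcand : ∀ j : Nat, j < k + 1 →
          PySem.Chars.strip (pvRstripDots (PySem.Chars.join [' ']
            (PySem.List.slice words (some ((k : Int) - j)) (some ((k : Int) + 1)))))
            = pvCandOf (((words.take (k+1)).reverse.take (j+1)).reverse ++ []) := by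
        intro j hj
        rw [hslice j hj]
        rfl
      refine filtermap_congr _ _ _ _ (List.range (k+1)) ?_ ?_
      · intro j hj
        rw [List.mem_range] at hj
        rw [hcand j hj]
      · intro j hj
        rw [List.mem_range] at hj
        rw [hcand j hj]
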